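-- pv_equiv track=rewrite | github.com/constantdalink-cmyk/GSS-OS | GSSU/extractor.py | locate_function
-- ===== SOURCE A (Python) =====
-- def locate_function(text: str, func_name: str):
--     """
--     在代码文本里定位某个函数的行范围。
--     返回 (start_line, end_line) 从1开始，或 (0, 0) 表示未找到。
--     """
--     lines = text.split("\n")
--     start = 0
--
--     # 找到目标函数的起始行
--     for i, line in enumerate(lines):
--         clean = line.strip()
--         if clean.startswith("def ") and func_name in clean:
--             start = i + 1  # 行号从1开始
--             break
--
--     if not start:
--         return 0, 0
--
--     # 找到下一个同级 def/class 的起始行作为结束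
--     end = len(lines)
--     for i in range(start, len(lines)):  # start 是1-based，直接用作0-based的下一行
--         clean = lines[i].strip()
--         if clean.startswith("def ") or clean.startswith("class "):
--             end = i  # 0-based index 即为前一行的1-based行号
--             break
--
--     return start, end
-- ===== SOURCE B (Python) =====
-- def _is_marker(s):
--     return s.startswith("def ") or s.startswith("class ")
--
-- def _is_target(func_name, s):
--     return s.startswith("def ") and func_name in s
--
-- def locate_function(text: str, func_name: str):
--     lines = text.split("\n")
--     # one pass: collect (index, stripped) of every def/class marker line
--     markers = []
--     for i, line in enumerate(lines):
--         s = line.strip()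
--         if _is_marker(s):
--             markers.append((i, s))
--     # first def-marker mentioning func_name
--     hit = next((p for p in markers if _is_target(func_name, p[1])), None)
--     if hit is None:
--         return 0, 0
--     start = hit[0] + 1
--     end = next((p[0] for p in markers if p[0] >= start), len(lines))
--     return start, end
-- ===== Notes on version B (the rewrite author's own statement) =====
-- stated objective: alternative
-- what changed: Instead of two independent scans over the raw lines (one for the matching def, one restarted to find the next def/class), B makes one pass that builds an index of all def/class marker lines (position, stripped text) and resolves both the start line and the end boundary by lookups in that marker list.
import Mathlib
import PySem

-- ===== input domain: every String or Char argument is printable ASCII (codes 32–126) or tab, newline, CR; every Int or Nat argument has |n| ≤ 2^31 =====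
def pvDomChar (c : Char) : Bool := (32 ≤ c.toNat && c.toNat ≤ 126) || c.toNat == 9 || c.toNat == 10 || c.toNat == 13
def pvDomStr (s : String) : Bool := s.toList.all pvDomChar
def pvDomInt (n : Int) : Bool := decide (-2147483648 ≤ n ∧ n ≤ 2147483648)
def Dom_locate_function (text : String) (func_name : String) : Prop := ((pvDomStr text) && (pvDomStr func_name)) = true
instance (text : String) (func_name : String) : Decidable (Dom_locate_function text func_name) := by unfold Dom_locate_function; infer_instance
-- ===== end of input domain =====

-- B replaces A's two independent scans by one pass that indexes every def/class marker line,
-- then answers both the start and the end lookup from that marker list (objective: alternative).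


-- ===== PORT A =====
-- first loop of A: enumerate lines, break at the first stripped line that startswith "def " and contains func_name
def lfFindStart (func_name : String) : List String → Nat → Int
  | [], _ => 0
  | line :: rest, i =>
    let clean := PySem.Str.strip line
    if PySem.Str.startswith clean "def " && PySem.Str.isIn func_name clean then (i : Int) + 1
    else lfFindStart func_name rest (i + 1)

-- second loop of A: for i in range(start, len(lines)), break at the first def/class marker
def lfFindEnd (lines : List String) (i : Nat) : Int :=
  if h : i < lines.length then
    let clean := PySem.Str.strip lines[i]
    if PySem.Str.startswith clean "def " || PySem.Str.startswith clean "class " then (i : Int)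
    else lfFindEnd lines (i + 1)
  else (lines.length : Int)
termination_by lines.length - i

def locate_function (text : String) (func_name : String) : Int × Int :=
  let lines := (PySem.Str.split? text "\n").getD []   -- sep "\n" ≠ "", so split? is always `some`
  let start := lfFindStart func_name lines 0
  if start = 0 then (0, 0)
  else (start, lfFindEnd lines start.toNat)

-- ===== PORT B =====
-- Source B's _is_marker
def lfIsMarker (s : String) : Bool :=
  PySem.Str.startswith s "def " || PySem.Str.startswith s "class "

-- Source B's _is_target
def lfIsTgt (func_name : String) (s : String) : Bool :=
  PySem.Str.startswith s "def " && PySem.Str.isIn func_name s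

-- Source B's marker-collecting loop (i is the enumerate counter)
def lfMarkersFrom (i : Nat) : List String → List (Nat × String)
  | [] => []
  | line :: rest =>
    let s := PySem.Str.strip line
    if lfIsMarker s then (i, s) :: lfMarkersFrom (i + 1) rest
    else lfMarkersFrom (i + 1) rest

def locate_function_alt (text : String) (func_name : String) : Int × Int :=
  let lines := (PySem.Str.split? text "\n").getD []   -- sep "\n" ≠ "", so split? is always `some`
  let markers := lfMarkersFrom 0 lines
  match markers.find? (fun p => lfIsTgt func_name p.2) with
  | none => (0, 0)
  | some hit =>
    let start := hit.1 + 1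
    let stop := match markers.find? (fun p => start ≤ p.1) with
      | some p => p.1
      | none => lines.length
    ((start : Int), (stop : Int))

-- ===== PRECONDITION & SPEC =====
def Spec_locate_function (text : String) (func_name : String) (out : Int × Int) : Prop := out = locate_function_alt text func_name
instance (text : String) (func_name : String) (out : Int × Int) : Decidable (Spec_locate_function text func_name out) := by unfold Spec_locate_function; infer_instance

-- ===== CLAIM (what is proved, stated in full; the proofs are below) =====
def Claim_equal_locate_function : Prop := ∀ (text : String) (func_name : String), Dom_locate_function text func_name → Spec_locate_function text func_name (locate_function text func_name)

-- ===== LEMMAS AND PROOFS =====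

-- A's first loop is the first index whose stripped line is a matching def
theorem lfFindStart_eq (fn : String) (lines : List String) (k : Nat) :
    lfFindStart fn lines k =
      match lines.findIdx? (fun l => lfIsTgt fn (PySem.Str.strip l)) with
      | some j => ((k + j : Nat) : Int) + 1
      | none => 0 := by
  induction lines generalizing k with
  | nil => simp [lfFindStart]
  | cons l rest ih =>
    simp only [lfFindStart, List.findIdx?_cons, lfIsTgt]
    by_cases h : (PySem.Str.startswith (PySem.Str.strip l) "def " && PySem.Str.isIn fn (PySem.Str.strip l)) = true
    · rw [if_pos h, if_pos h]
      simp
    · rw [if_neg h, if_neg h, ih]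
      simp only [lfIsTgt]
      cases hf : rest.findIdx? (fun l => PySem.Str.startswith (PySem.Str.strip l) "def " && PySem.Str.isIn fn (PySem.Str.strip l)) with
      | none => rfl
      | some j =>
        simp only [Option.map_some]
        push_cast
        ring

-- A's second loop is the first marker index ≥ i (default: length)
theorem lfFindEnd_eq (lines : List String) (i : Nat) :
    lfFindEnd lines i =
      match (lines.drop i).findIdx? (fun l => lfIsMarker (PySem.Str.strip l)) with
      | some j => ((i + j : Nat) : Int)
      | none => (lines.length : Int) := by
  fun_induction lfFindEnd lines i with
  | case1 i h clean hm =>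
    rw [List.drop_eq_getElem_cons h, List.findIdx?_cons,
        if_pos (show lfIsMarker (PySem.Str.strip lines[i]) = true from hm)]
    simp
  | case2 i h clean hm ih =>
    rw [List.drop_eq_getElem_cons h, List.findIdx?_cons,
        if_neg (show ¬ lfIsMarker (PySem.Str.strip lines[i]) = true from hm), ih]
    cases hf : (lines.drop (i + 1)).findIdx? (fun l => lfIsMarker (PySem.Str.strip l)) with
    | none => rfl
    | some j =>
      simp only [Option.map_some]
      push_cast
      ring
  | case3 i h =>
    rw [List.drop_eq_nil_of_le (by omega)]
    simp

-- B's start lookup over the marker list: first index whose stripped line is a matching def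
theorem markers_find_start (fn : String) (lines : List String) (k : Nat) :
    ((lfMarkersFrom k lines).find? (fun p => lfIsTgt fn p.2)).map (fun p => p.1)
      = (lines.findIdx? (fun l => lfIsTgt fn (PySem.Str.strip l))).map (fun j => k + j) := by
  induction lines generalizing k with
  | nil => simp [lfMarkersFrom]
  | cons l rest ih =>
    simp only [lfMarkersFrom, List.findIdx?_cons]
    by_cases hm : lfIsMarker (PySem.Str.strip l) = true
    · rw [if_pos hm]
      by_cases ht : lfIsTgt fn (PySem.Str.strip l) = true
      · rw [List.find?_cons_of_pos (by exact ht), if_pos ht]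
        simp
      · rw [List.find?_cons_of_neg (by simpa using ht), if_neg ht, ih]
        cases hf : rest.findIdx? (fun l => lfIsTgt fn (PySem.Str.strip l)) with
        | none => simp
        | some j =>
          simp only [Option.map_some, Option.some.injEq]
          omega
    · have ht : lfIsTgt fn (PySem.Str.strip l) = false := by
        cases hq : lfIsTgt fn (PySem.Str.strip l)
        · rfl
        · exact absurd (by
            unfold lfIsMarker
            unfold lfIsTgt at hq
            simp at hq ⊢
            exact Or.inl hq.1) hm
      rw [if_neg hm, if_neg (by simp [ht]), ih]
      cases hf : rest.findIdx? (fun l => lfIsTgt fn (PySem.Str.strip l)) with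
      | none => simp
      | some j =>
        simp only [Option.map_some, Option.some.injEq]
        omega

-- B's end lookup: the first marker with index ≥ s is the first marker line at or after position s
theorem markers_find_end (lines : List String) (s : Nat) : ∀ (k : Nat),
    ((lfMarkersFrom k lines).find? (fun p => s ≤ p.1)).map (fun p => p.1)
      = ((lines.drop (s - k)).findIdx? (fun l => lfIsMarker (PySem.Str.strip l))).map (fun j => k + (s - k) + j) := by
  induction lines with
  | nil => intro k; simp [lfMarkersFrom]
  | cons l rest ih =>
    intro k
    simp only [lfMarkersFrom]
    by_cases hk : s ≤ k
    · have hsk : s - k = 0 := by omega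
      rw [hsk]
      simp only [List.drop_zero, List.findIdx?_cons]
      by_cases hm : lfIsMarker (PySem.Str.strip l) = true
      · rw [if_pos hm, List.find?_cons_of_pos (by simpa using hk), if_pos hm]
        simp
      · rw [if_neg hm, if_neg hm, ih (k + 1)]
        have h1 : s - (k + 1) = 0 := by omega
        rw [h1, List.drop_zero]
        cases hf : rest.findIdx? (fun l => lfIsMarker (PySem.Str.strip l)) with
        | none => simp
        | some j =>
          simp only [Option.map_some, Option.some.injEq]
          omega
    · have hd : s - k = (s - (k + 1)) + 1 := by omega
      rw [hd]
      simp only [List.drop_succ_cons]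
      by_cases hm : lfIsMarker (PySem.Str.strip l) = true
      · rw [if_pos hm, List.find?_cons_of_neg (by simp; omega), ih (k + 1)]
        cases hf : (rest.drop (s - (k + 1))).findIdx? (fun l => lfIsMarker (PySem.Str.strip l)) with
        | none => simp
        | some j =>
          simp only [Option.map_some, Option.some.injEq]
          omega
      · rw [if_neg hm, ih (k + 1)]
        cases hf : (rest.drop (s - (k + 1))).findIdx? (fun l => lfIsMarker (PySem.Str.strip l)) with
        | none => simp
        | some j =>
          simp only [Option.map_some, Option.some.injEq]
          omega

-- the core equality, on the split line list
theorem lf_core (fn : String) (lines : List String) :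
    (let start := lfFindStart fn lines 0;
     if start = 0 then ((0 : Int), (0 : Int)) else (start, lfFindEnd lines start.toNat)) =
    (match (lfMarkersFrom 0 lines).find? (fun p => lfIsTgt fn p.2) with
     | none => ((0 : Int), (0 : Int))
     | some hit =>
       let start := hit.1 + 1
       let stop := match (lfMarkersFrom 0 lines).find? (fun p => start ≤ p.1) with
         | some p => p.1
         | none => lines.length
       ((start : Int), (stop : Int))) := by
  have hstart := markers_find_start fn lines 0
  rw [lfFindStart_eq]
  cases hfe : (lfMarkersFrom 0 lines).find? (fun p => lfIsTgt fn p.2) with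
  | none =>
    rw [hfe] at hstart
    simp only [Option.map_none] at hstart
    cases hf : lines.findIdx? (fun l => lfIsTgt fn (PySem.Str.strip l)) with
    | none => rfl
    | some j => rw [hf] at hstart; simp at hstart
  | some hit =>
    rw [hfe] at hstart
    cases hf : lines.findIdx? (fun l => lfIsTgt fn (PySem.Str.strip l)) with
    | none => rw [hf] at hstart; simp at hstart
    | some j =>
      rw [hf] at hstart
      simp only [Option.map_some, Option.some.injEq, Nat.zero_add] at hstart
      dsimp only
      rw [if_neg (show ¬(((0 + j : Nat) : Int) + 1 = 0) by push_cast; omega)]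
      have htonat : (((0 + j : Nat) : Int) + 1).toNat = j + 1 := by omega
      rw [htonat, lfFindEnd_eq, hstart]
      have hend := markers_find_end lines (j + 1) 0
      simp only [Nat.sub_zero, Nat.zero_add] at hend
      cases hfe2 : (lfMarkersFrom 0 lines).find? (fun p => j + 1 ≤ p.1) with
      | none =>
        rw [hfe2] at hend
        simp only [Option.map_none] at hend
        cases hg : (lines.drop (j + 1)).findIdx? (fun l => lfIsMarker (PySem.Str.strip l)) with
        | none =>
          refine Prod.ext (by push_cast; ring) (by simp)
        | some j2 => rw [hg] at hend; simp at hend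
      | some p =>
        rw [hfe2] at hend
        simp only [Option.map_some] at hend
        cases hg : (lines.drop (j + 1)).findIdx? (fun l => lfIsMarker (PySem.Str.strip l)) with
        | none => rw [hg] at hend; simp at hend
        | some j2 =>
          rw [hg] at hend
          simp only [Option.map_some, Option.some.injEq] at hend
          refine Prod.ext (by push_cast; ring) ?_
          dsimp only
          rw [hend]

-- ===== VERDICT (by name: the statement is the Claim_ definition above) =====
theorem locate_function_spec : Claim_equal_locate_function := by
  intro text fn _
  unfold Spec_locate_function locate_function locate_function_alt
  exact lf_core fn ((PySem.Str.split? text "\n").getD [])
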